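-- pv_equiv track=rewrite | github.com/danielw98/jpeg-encoder | scripts/generate_test_images.py | generate_grayscale_ramp
-- ===== SOURCE A (Python) =====
-- def generate_grayscale_ramp(width, height):
--     """Generate 8-level grayscale ramp (good for quantization testing)"""
--     gray = []
--     levels = [0, 36, 73, 109, 146, 182, 219, 255]
--     step_width = width // len(levels)
--
--     for y in range(height):
--         for x in range(width):
--             level_index = min(x // step_width, len(levels) - 1)
--             gray.append(levels[level_index])
--
--     return gray
-- ===== SOURCE B (Python) =====
-- def generate_grayscale_ramp(width, height):
--     """Generate 8-level grayscale ramp (good for quantization testing)"""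
--     if width <= 0 or height <= 0:
--         return []
--     levels = [0, 36, 73, 109, 146, 182, 219, 255]
--     step_width = width // len(levels)
--     row = []
--     for level in levels[:-1]:
--         row += [level] * step_width
--     row += [levels[-1]] * (width - step_width * 7)
--     return row * height
-- ===== Notes on version B (the rewrite author's own statement) =====
-- stated objective: alternative
-- what changed: B builds one row by run-length concatenation (seven blocks of step_width copies of each level plus a final 255 block, no per-pixel division or min) and replicates it height times with list multiplication, replacing A's nested y/x loop that divides and indexes per pixel.
import Mathlib
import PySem

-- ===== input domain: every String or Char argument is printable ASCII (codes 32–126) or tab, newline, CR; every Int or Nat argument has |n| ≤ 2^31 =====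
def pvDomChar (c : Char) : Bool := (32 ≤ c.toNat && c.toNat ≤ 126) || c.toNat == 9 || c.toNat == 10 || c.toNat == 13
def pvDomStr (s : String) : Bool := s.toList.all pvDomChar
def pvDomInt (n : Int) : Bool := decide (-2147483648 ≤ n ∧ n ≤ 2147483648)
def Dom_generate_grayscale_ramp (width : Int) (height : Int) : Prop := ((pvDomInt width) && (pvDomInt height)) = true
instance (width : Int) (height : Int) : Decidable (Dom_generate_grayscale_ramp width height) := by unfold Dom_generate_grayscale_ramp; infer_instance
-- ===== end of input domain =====

-- B builds one row by run-length concatenation (seven step_width blocks plus a 255 tail block,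
-- no per-pixel division) and replicates it height times; same return value on Pre_.

-- ===== PORT A =====
def generate_grayscale_ramp (width : Int) (height : Int) : List Int :=
  let levels : List Int := [0, 36, 73, 109, 146, 182, 219, 255]
  let step_width := PySem.Int.floordiv width 8   -- len(levels) = 8
  (PySem.List.pyRange 0 height 1).foldl (fun gray _y =>
    (PySem.List.pyRange 0 width 1).foldl (fun gray x =>
      gray ++ [PySem.List.pyGetD levels (min (PySem.Int.floordiv x step_width) 7) 0]) gray) []

-- ===== PORT B =====
def generate_grayscale_ramp_alt (width : Int) (height : Int) : List Int :=
  if width ≤ 0 ∨ height ≤ 0 then [] else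
  let levels : List Int := [0, 36, 73, 109, 146, 182, 219, 255]
  let step_width := PySem.Int.floordiv width 8
  let row := (PySem.List.slice levels none (some (-1))).foldl
      (fun row level => row ++ PySem.List.pyRepeat [level] step_width) []
  let row := row ++ PySem.List.pyRepeat [PySem.List.pyGetD levels (-1) 0] (width - step_width * 7)
  PySem.List.pyRepeat row height

-- ===== PRECONDITION & SPEC =====
-- Pre_ excludes exactly the inputs where A raises ZeroDivisionError: 1 ≤ width ≤ 7 makes
-- step_width = 0 and the pixel loop runs as soon as height ≥ 1.
def Pre_generate_grayscale_ramp (width : Int) (height : Int) : Prop := width ≤ 0 ∨ 8 ≤ width ∨ height ≤ 0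
instance (width : Int) (height : Int) : Decidable (Pre_generate_grayscale_ramp width height) := by unfold Pre_generate_grayscale_ramp; infer_instance
def pvWitness_generate_grayscale_ramp : Int × Int := (16, 2)

def Spec_generate_grayscale_ramp (width : Int) (height : Int) (out : List Int) : Prop := out = generate_grayscale_ramp_alt width height
instance (width : Int) (height : Int) (out : List Int) : Decidable (Spec_generate_grayscale_ramp width height out) := by unfold Spec_generate_grayscale_ramp; infer_instance

-- ===== CLAIM (what is proved, stated in full; the proofs are below) =====
def Claim_equal_generate_grayscale_ramp : Prop := ∀ (width : Int) (height : Int), Dom_generate_grayscale_ramp width height → Pre_generate_grayscale_ramp width height → Spec_generate_grayscale_ramp width height (generate_grayscale_ramp width height)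
-- ===== LEMMAS AND PROOFS =====

-- A's outer loop appends the same row once per iteration
theorem pv_foldl_append_const {α : Type} (l : List α) (row acc : List Int) :
    l.foldl (fun a _ => a ++ row) acc = acc ++ (List.replicate l.length row).flatten := by
  induction l generalizing acc with
  | nil => simp
  | cons x xs ih => simp [List.foldl_cons, ih, List.replicate_succ, List.append_assoc]

-- mapping a function constant on [a,b) over range(a,b) yields a replicate block
theorem pv_map_const_chunk (f : Int → Int) (a b c : Int)
    (h : ∀ x, a ≤ x → x < b → f x = c) :
    (PySem.List.pyRange a b 1).map f = List.replicate (b - a).toNat c := by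
  have hmem : ∀ y ∈ (PySem.List.pyRange a b 1).map f, y = c := by
    intro y hy
    obtain ⟨x, hx, rfl⟩ := List.mem_map.mp hy
    obtain ⟨h1, h2⟩ := (PySem.List.mem_pyRange_one).mp hx
    exact h x h1 h2
  have := List.eq_replicate_of_mem hmem
  rwa [List.length_map, PySem.List.length_pyRange_one] at this

-- one constant chunk of A's row: on [k*s,(k+1)*s) the pixel is levels[k]
theorem pv_chunk_val (s : Int) (hs1 : 1 ≤ s) (a b k c : Int)
    (ha : a = k * s) (hb : b = (k + 1) * s) (hk0 : 0 ≤ k) (hk6 : k ≤ 6)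
    (hc : PySem.List.pyGetD [0, 36, 73, 109, 146, 182, 219, 255] k 0 = c) :
    (PySem.List.pyRange a b 1).map (fun x =>
      PySem.List.pyGetD [0, 36, 73, 109, 146, 182, 219, 255]
        (min (PySem.Int.floordiv x s) 7) 0) = List.replicate s.toNat c := by
  subst ha hb hc
  refine (pv_map_const_chunk _ _ _ _ ?_).trans
    (by rw [show ((k + 1) * s - k * s) = s from by ring])
  intro x h1 h2
  show PySem.List.pyGetD _ _ _ = _
  rw [(PySem.Int.floordiv_eq_iff_of_pos (by omega)).mpr ⟨h1, h2⟩, min_eq_left (by omega)]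

-- the per-pixel row of A equals B's run-length row, for width ≥ 8
theorem pv_row_eq (width : Int) (hw : 8 ≤ width) :
    (PySem.List.pyRange 0 width 1).map (fun x =>
      PySem.List.pyGetD [(0:Int), 36, 73, 109, 146, 182, 219, 255]
        (min (PySem.Int.floordiv x (PySem.Int.floordiv width 8)) 7) 0) =
    (List.replicate (PySem.Int.floordiv width 8).toNat (0:Int) ++
     List.replicate (PySem.Int.floordiv width 8).toNat 36 ++
     List.replicate (PySem.Int.floordiv width 8).toNat 73 ++
     List.replicate (PySem.Int.floordiv width 8).toNat 109 ++
     List.replicate (PySem.Int.floordiv width 8).toNat 146 ++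
     List.replicate (PySem.Int.floordiv width 8).toNat 182 ++
     List.replicate (PySem.Int.floordiv width 8).toNat 219 ++
     List.replicate (width - PySem.Int.floordiv width 8 * 7).toNat 255) := by
  set s := PySem.Int.floordiv width 8 with hs
  have hs1 : 1 ≤ s := by
    rw [hs]; exact (PySem.Int.le_floordiv_iff_mul_le (by omega)).mpr (by omega)
  have hs8 : s * 8 ≤ width :=
    (PySem.Int.le_floordiv_iff_mul_le (a := width) (b := 8) (q := s) (by omega)).mp (le_of_eq hs)
  have hsp0 : PySem.List.pyRange (0*s) width 1 =
      PySem.List.pyRange (0*s) (1*s) 1 ++ PySem.List.pyRange (1*s) width 1 :=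
    PySem.List.pyRange_one_append _ _ _ (by nlinarith) (by nlinarith)
  have hsp1 : PySem.List.pyRange (1*s) width 1 =
      PySem.List.pyRange (1*s) (2*s) 1 ++ PySem.List.pyRange (2*s) width 1 :=
    PySem.List.pyRange_one_append _ _ _ (by nlinarith) (by nlinarith)
  have hsp2 : PySem.List.pyRange (2*s) width 1 =
      PySem.List.pyRange (2*s) (3*s) 1 ++ PySem.List.pyRange (3*s) width 1 :=
    PySem.List.pyRange_one_append _ _ _ (by nlinarith) (by nlinarith)
  have hsp3 : PySem.List.pyRange (3*s) width 1 =
      PySem.List.pyRange (3*s) (4*s) 1 ++ PySem.List.pyRange (4*s) width 1 :=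
    PySem.List.pyRange_one_append _ _ _ (by nlinarith) (by nlinarith)
  have hsp4 : PySem.List.pyRange (4*s) width 1 =
      PySem.List.pyRange (4*s) (5*s) 1 ++ PySem.List.pyRange (5*s) width 1 :=
    PySem.List.pyRange_one_append _ _ _ (by nlinarith) (by nlinarith)
  have hsp5 : PySem.List.pyRange (5*s) width 1 =
      PySem.List.pyRange (5*s) (6*s) 1 ++ PySem.List.pyRange (6*s) width 1 :=
    PySem.List.pyRange_one_append _ _ _ (by nlinarith) (by nlinarith)
  have hsp6 : PySem.List.pyRange (6*s) width 1 =
      PySem.List.pyRange (6*s) (7*s) 1 ++ PySem.List.pyRange (7*s) width 1 :=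
    PySem.List.pyRange_one_append _ _ _ (by nlinarith) (by nlinarith)
  have htail : (PySem.List.pyRange (7*s) width 1).map (fun x =>
        PySem.List.pyGetD [(0:Int), 36, 73, 109, 146, 182, 219, 255]
          (min (PySem.Int.floordiv x s) 7) 0) =
      List.replicate (width - s * 7).toNat 255 := by
    refine (pv_map_const_chunk (fun x =>
        PySem.List.pyGetD [(0:Int), 36, 73, 109, 146, 182, 219, 255]
          (min (PySem.Int.floordiv x s) 7) 0) (7*s) width 255 ?_).trans
      (by rw [show (width - 7 * s) = width - s * 7 from by ring])
    intro x h1 _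
    have h7 : 7 ≤ PySem.Int.floordiv x s :=
      (PySem.Int.le_floordiv_iff_mul_le (by omega)).mpr h1
    show PySem.List.pyGetD _ _ _ = _
    rw [min_eq_right (by omega)]
    simp [PySem.List.pyGetD, PySem.List.pyGet?, PySem.List.pyIdx?]
  rw [show (PySem.List.pyRange 0 width 1) = PySem.List.pyRange (0*s) width 1 from by
        rw [zero_mul],
      hsp0, hsp1, hsp2, hsp3, hsp4, hsp5, hsp6]
  simp only [List.map_append]
  rw [pv_chunk_val s hs1 (0*s) (1*s) 0 0 (by ring) (by ring) (by omega) (by omega) (by decide),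
      pv_chunk_val s hs1 (1*s) (2*s) 1 36 (by ring) (by ring) (by omega) (by omega) (by decide),
      pv_chunk_val s hs1 (2*s) (3*s) 2 73 (by ring) (by ring) (by omega) (by omega) (by decide),
      pv_chunk_val s hs1 (3*s) (4*s) 3 109 (by ring) (by ring) (by omega) (by omega) (by decide),
      pv_chunk_val s hs1 (4*s) (5*s) 4 146 (by ring) (by ring) (by omega) (by omega) (by decide),
      pv_chunk_val s hs1 (5*s) (6*s) 5 182 (by ring) (by ring) (by omega) (by omega) (by decide),
      pv_chunk_val s hs1 (6*s) (7*s) 6 219 (by ring) (by ring) (by omega) (by omega) (by decide),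
      htail]
  simp [List.append_assoc]

-- ===== VERDICT (by name: the statement is the Claim_ definition above) =====
theorem generate_grayscale_ramp_spec : Claim_equal_generate_grayscale_ramp := by
  intro width height _ hpre
  unfold Spec_generate_grayscale_ramp generate_grayscale_ramp generate_grayscale_ramp_alt
  by_cases hh : height ≤ 0
  · simp [hh, PySem.List.pyRange_one_eq_nil (by omega : height ≤ (0:Int))]
  · by_cases hw0 : width ≤ 0
    · simp [hw0, PySem.List.pyRange_one_eq_nil (by omega : width ≤ (0:Int))]
    · have hw : 8 ≤ width := by rcases hpre with h|h|h <;> omega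
      simp only [show ¬ (width ≤ 0 ∨ height ≤ 0) by omega, if_false]
      simp only [PySem.List.foldl_append_singleton_eq_map]
      rw [pv_foldl_append_const, List.nil_append, pv_row_eq width hw]
      rw [PySem.List.slice_to_neg_one]
      simp only [List.dropLast, List.foldl_cons, List.foldl_nil,
        PySem.List.pyRepeat_singleton, List.nil_append]
      simp [PySem.List.pyRepeat, PySem.List.length_pyRange_one, PySem.List.pyGetD,
        PySem.List.pyGet?, PySem.List.pyIdx?, List.append_assoc]
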